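-- pv_equiv track=rewrite | github.com/selfreferencing/erdos-86-lean | phase1_original_type.py | check_type_ii_original
-- ===== SOURCE A (Python) =====
-- import math
-- from typing import List, Dict, Optional, Tuple
--
-- def get_divisors(n: int) -> List[int]:
--     if n <= 0:
--         return []
--     divisors = []
--     for i in range(1, int(math.isqrt(n)) + 1):
--         if n % i == 0:
--             divisors.append(i)
--             if i != n // i:
--                 divisors.append(n // i)
--     return sorted(divisors)
--
-- def check_type_ii_original(p: int, k_max: int = None) -> Optional[Tuple[int, int, int]]:
--     """
--     Check ORIGINAL Type II condition (Lemma 7B style).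
--
--     For x_k = (p + m_k)/4 where m_k = 4k+3,
--     Need coprime (a,b) with a,b | x_k, a+b ≡ 0 (mod m_k), and b ≥ √x_k
--
--     Returns (k, a, b) witness if found, None otherwise.
--     """
--     if k_max is None:
--         k_max = min(p, 1000)
--
--     for k in range(0, k_max + 1):
--         m_k = 4 * k + 3
--
--         # Check if (p + m_k) is divisible by 4
--         if (p + m_k) % 4 != 0:
--             continue
--
--         x_k = (p + m_k) // 4
--         sqrt_x = math.isqrt(x_k)
--
--         divisors = get_divisors(x_k)
--
--         # Find coprime pair (a, b) with a+b ≡ 0 (mod m_k) and b ≥ √x_k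
--         for a in divisors:
--             for b in divisors:
--                 if b < sqrt_x:
--                     continue
--                 if a * b > x_k:  # a and b must both divide x_k
--                     continue
--                 if x_k % a != 0 or x_k % b != 0:
--                     continue
--                 if math.gcd(a, b) != 1:
--                     continue
--                 if (a + b) % m_k == 0:
--                     return (k, a, b)
--
--     return None
-- ===== SOURCE B (Python) =====
-- import math
-- from typing import List, Optional, Tuple
--
--
-- def get_divisors(n: int) -> List[int]:
--     # build the divisors already in ascending order: small divisors up to isqrt(n),
--     # then their cofactors in reverse -- no sort needed
--     if n <= 0:
--         return []
--     smalls = [i for i in range(1, math.isqrt(n) + 1) if n % i == 0]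
--     larges = [n // i for i in reversed(smalls) if i * i != n]
--     return smalls + larges
--
--
-- def check_type_ii_original(p: int, k_max: int = None) -> Optional[Tuple[int, int, int]]:
--     """Divisors are produced sorted by a two-list merge (no sort call); per k the
--     divisors are bucketed by residue mod m_k, and for each a only the bucket of the
--     complementary residue (-a) % m_k is scanned with next()."""
--     if k_max is None:
--         k_max = min(p, 1000)
--
--     for k in range(0, k_max + 1):
--         m_k = 4 * k + 3
--         if (p + m_k) % 4 != 0:
--             continue
--         x_k = (p + m_k) // 4
--         sqrt_x = math.isqrt(x_k)
--         divisors = get_divisors(x_k)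
--
--         buckets = {}
--         for d in divisors:
--             buckets.setdefault(d % m_k, []).append(d)
--
--         for a in divisors:
--             b = next((b for b in buckets.get((-a) % m_k, [])
--                       if b >= sqrt_x and a * b <= x_k
--                       and x_k % a == 0 and x_k % b == 0
--                       and math.gcd(a, b) == 1), None)
--             if b is not None:
--                 return (k, a, b)
--
--     return None
-- ===== Notes on version B (the rewrite author's own statement) =====
-- stated objective: alternative
-- what changed: B builds the divisor list already sorted (ascending small divisors, then their cofactors in reverse) instead of append-then-sort, and per k groups the divisors into residue-class buckets mod m_k so each a scans only the bucket of the complementary residue (-a) % m_k via next(), instead of rescanning the whole divisor list with a residue test per pair.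
import Mathlib
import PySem

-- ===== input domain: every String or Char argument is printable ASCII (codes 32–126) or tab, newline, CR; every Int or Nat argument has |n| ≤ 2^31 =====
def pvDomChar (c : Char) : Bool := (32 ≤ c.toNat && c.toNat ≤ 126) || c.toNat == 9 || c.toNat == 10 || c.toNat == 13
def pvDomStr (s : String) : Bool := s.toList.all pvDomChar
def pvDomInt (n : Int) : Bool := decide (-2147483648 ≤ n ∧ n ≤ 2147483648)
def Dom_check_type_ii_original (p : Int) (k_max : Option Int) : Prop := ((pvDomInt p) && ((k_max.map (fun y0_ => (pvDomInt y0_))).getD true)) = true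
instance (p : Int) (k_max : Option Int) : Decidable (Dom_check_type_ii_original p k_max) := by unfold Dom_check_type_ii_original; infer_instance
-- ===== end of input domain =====

-- B builds the divisor list already sorted (small divisors + reversed cofactors, no sort call) and,
-- per k, buckets it by residue mod m_k, scanning only the complementary bucket per a; same return value.

-- ===== PORT A =====
-- math.isqrt(n) ported as Int.sqrt: exact for n ≥ 0 (math.isqrt raises on n < 0, excluded by Pre_).
def get_divisors (n : Int) : List Int :=
  if n ≤ 0 then []
  else
    let divisors := (PySem.List.pyRange 1 (Int.sqrt n + 1) 1).foldl
      (fun acc i =>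
        if PySem.Int.mod n i = 0 then
          let acc := acc ++ [i]
          if i ≠ PySem.Int.floordiv n i then acc ++ [PySem.Int.floordiv n i] else acc
        else acc) []
    PySem.List.sorted divisors (fun x => x) false

-- A's inner 'for b in divisors' loop (continue = recurse, return = some)
def ctiiInnerA (k a x sqrt_x m : Int) : List Int → Option (Int × Int × Int)
  | [] => none
  | b :: bs =>
    if b < sqrt_x then ctiiInnerA k a x sqrt_x m bs
    else if a * b > x then ctiiInnerA k a x sqrt_x m bs
    else if PySem.Int.mod x a ≠ 0 ∨ PySem.Int.mod x b ≠ 0 then ctiiInnerA k a x sqrt_x m bs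
    else if Int.gcd a b ≠ 1 then ctiiInnerA k a x sqrt_x m bs
    else if PySem.Int.mod (a + b) m = 0 then some (k, a, b)
    else ctiiInnerA k a x sqrt_x m bs

-- A's body for one k of the outer loop ('continue' on the %4 test = none)
def ctiiBodyA (p k : Int) : Option (Int × Int × Int) :=
  let m := 4 * k + 3
  if PySem.Int.mod (p + m) 4 ≠ 0 then none
  else
    let x := PySem.Int.floordiv (p + m) 4
    let sqrt_x := Int.sqrt x
    let ds := get_divisors x
    ds.findSome? (fun a => ctiiInnerA k a x sqrt_x m ds)

def check_type_ii_original (p : Int) (k_max : Option Int) : Option (Int × Int × Int) :=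
  let km := k_max.getD (min p 1000)
  (PySem.List.pyRange 0 (km + 1) 1).findSome? (fun k => ctiiBodyA p k)

-- ===== PORT B =====
-- Source B's get_divisors: small divisors ascending, then cofactors of the reversed smalls (no sort)
def get_divisors_alt (n : Int) : List Int :=
  if n ≤ 0 then []
  else
    let smalls := (PySem.List.pyRange 1 (Int.sqrt n + 1) 1).filter (fun i => PySem.Int.mod n i == 0)
    smalls ++ (smalls.reverse.filter (fun i => i * i != n)).map (fun i => PySem.Int.floordiv n i)

-- buckets: residue (d % m) ↦ ascending list of divisors with that residue
def ctiiBuckets (m : Int) (ds : List Int) : PySem.Dict Int (List Int) :=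
  ds.foldl (fun dct d => dct.modify (PySem.Int.mod d m) [] (· ++ [d])) PySem.Dict.empty

-- Source B's body for one k: find the first b of the complementary bucket via next(...)
def ctiiBodyB (p k : Int) : Option (Int × Int × Int) :=
  let m := 4 * k + 3
  if PySem.Int.mod (p + m) 4 ≠ 0 then none
  else
    let x := PySem.Int.floordiv (p + m) 4
    let sqrt_x := Int.sqrt x
    let ds := get_divisors_alt x
    let buckets := ctiiBuckets m ds
    ds.findSome? (fun a =>
      ((buckets.getD (PySem.Int.mod (-a) m) []).find? (fun b =>
        decide (sqrt_x ≤ b ∧ a * b ≤ x ∧ PySem.Int.mod x a = 0 ∧ PySem.Int.mod x b = 0 ∧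
          Int.gcd a b = 1))).map (fun b => (k, a, b)))

def check_type_ii_original_alt (p : Int) (k_max : Option Int) : Option (Int × Int × Int) :=
  let km := k_max.getD (min p 1000)
  (PySem.List.pyRange 0 (km + 1) 1).findSome? (fun k => ctiiBodyB p k)

-- ===== PRECONDITION & SPEC =====
-- Pre_ excludes exactly the inputs where Python A raises (ValueError from math.isqrt of a
-- negative x_k): the loop runs (effective k_max ≥ 0), p ≡ 1 (mod 4) so k = 0 qualifies, and
-- x_0 = (p+3)//4 < 0, i.e. p < -3.  B raises there too.
def Pre_check_type_ii_original (p : Int) (k_max : Option Int) : Prop :=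
  ¬ (0 ≤ k_max.getD (min p 1000) ∧ p % 4 = 1 ∧ p < -3)
instance (p : Int) (k_max : Option Int) : Decidable (Pre_check_type_ii_original p k_max) := by unfold Pre_check_type_ii_original; infer_instance

def pvWitness_check_type_ii_original : Int × Option Int := (9, some 2)

def Spec_check_type_ii_original (p : Int) (k_max : Option Int) (out : Option (Int × Int × Int)) : Prop := out = check_type_ii_original_alt p k_max
instance (p : Int) (k_max : Option Int) (out : Option (Int × Int × Int)) : Decidable (Spec_check_type_ii_original p k_max out) := by unfold Spec_check_type_ii_original; infer_instance

-- ===== CLAIM (what is proved, stated in full; the proofs are below) =====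
def Claim_equal_check_type_ii_original : Prop := ∀ (p : Int) (k_max : Option Int), Dom_check_type_ii_original p k_max → Pre_check_type_ii_original p k_max → Spec_check_type_ii_original p k_max (check_type_ii_original p k_max)

-- ===== LEMMAS AND PROOFS =====

-- Int.sqrt lower bracket (math.isqrt), for nonnegative arguments
theorem pv_sqrt_sq_le (n : Int) (h : 0 ≤ n) : Int.sqrt n * Int.sqrt n ≤ n := by
  rw [Int.sqrt]
  have h1 : n.toNat.sqrt * n.toNat.sqrt ≤ n.toNat := Nat.sqrt_le n.toNat
  have h2 : ((n.toNat.sqrt * n.toNat.sqrt : Nat) : Int) ≤ ((n.toNat : Nat) : Int) := by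
    exact_mod_cast h1
  push_cast at h2; omega

-- A's append-building divisor loop, as a flatMap
theorem pv_foldl_divs (n : Int) (l : List Int) (acc : List Int) :
    l.foldl (fun acc i =>
      if PySem.Int.mod n i = 0 then
        let acc2 := acc ++ [i]
        if i ≠ PySem.Int.floordiv n i then acc2 ++ [PySem.Int.floordiv n i] else acc2
      else acc) acc
    = acc ++ l.flatMap (fun i =>
        if PySem.Int.mod n i = 0 then
          i :: (if i ≠ PySem.Int.floordiv n i then [PySem.Int.floordiv n i] else [])
        else []) := by
  induction l generalizing acc with
  | nil => simp
  | cons a t ih =>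
    rw [List.foldl_cons, ih, List.flatMap_cons]
    split_ifs with h1 h2 <;> simp [List.append_assoc]

-- flatMap of an 'if p then u else []' is a flatMap over the filter
theorem pv_flatMap_guard {α β : Type} (l : List α) (p : α → Prop) [DecidablePred p]
    (u : α → List β) :
    l.flatMap (fun i => if p i then u i else []) = (l.filter (fun i => decide (p i))).flatMap u := by
  induction l with
  | nil => rfl
  | cons a t ih =>
    by_cases h : p a <;> simp [h, ih]

-- flatMap (i :: h i) is a permutation of the list followed by flatMap h
theorem pv_flatMap_cons_perm {α : Type} (l : List α) (h : α → List α) :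
    (l.flatMap (fun i => i :: h i)).Perm (l ++ l.flatMap h) := by
  induction l with
  | nil => simp
  | cons a t ih =>
    simp only [List.flatMap_cons, List.cons_append]
    refine List.Perm.cons a ?_
    have h1 : (h a ++ t.flatMap (fun i => i :: h i)).Perm (h a ++ (t ++ t.flatMap h)) :=
      List.Perm.append_left _ ih
    have h2 : (h a ++ (t ++ t.flatMap h)).Perm (t ++ (h a ++ t.flatMap h)) := by
      rw [← List.append_assoc, ← List.append_assoc]
      exact List.Perm.append_right _ List.perm_append_comm
    exact h1.trans h2

-- the two divisor computations agree
theorem pv_divisors_eq (n : Int) : get_divisors n = get_divisors_alt n := by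
  unfold get_divisors get_divisors_alt
  split_ifs with hn
  · rfl
  · rw [not_le] at hn
    have hn0 : 0 ≤ n := le_of_lt hn
    have hs0 : 0 ≤ Int.sqrt n := Int.sqrt_nonneg n
    set s := Int.sqrt n with hs
    set R := PySem.List.pyRange 1 (s + 1) 1 with hR
    set smalls := R.filter (fun i => PySem.Int.mod n i == 0) with hsm
    set mids := (smalls.filter (fun i => i * i != n)).map (fun i => PySem.Int.floordiv n i)
      with hmid
    -- facts about the members of smalls
    have hmem : ∀ i ∈ smalls, 1 ≤ i ∧ i ≤ s ∧ i ∣ n := by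
      intro i hi
      rw [hsm, List.mem_filter] at hi
      obtain ⟨hiR, hdiv⟩ := hi
      rw [hR, PySem.List.mem_pyRange_one] at hiR
      have : PySem.Int.mod n i = 0 := by simpa using hdiv
      exact ⟨hiR.1, by omega, (PySem.Int.mod_eq_zero_iff_dvd n i).mp this⟩
    have hcof : ∀ i, 1 ≤ i → i ∣ n → i * PySem.Int.floordiv n i = n := by
      intro i h1 hd
      rw [PySem.Int.floordiv_eq_ediv_of_pos (by omega), mul_comm]
      exact Int.ediv_mul_cancel hd
    have hcof_pos : ∀ i, 1 ≤ i → i ∣ n → 1 ≤ PySem.Int.floordiv n i := by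
      intro i h1 hd
      have := hcof i h1 hd
      nlinarith
    -- a small divisor with i*i ≠ n has cofactor strictly above the sqrt
    have hbig : ∀ i, 1 ≤ i → i ≤ s → i ∣ n → i * i ≠ n → s < PySem.Int.floordiv n i := by
      intro i h1 hle hd hne
      by_contra hcon
      rw [not_lt] at hcon
      have he := hcof i h1 hd
      have hdp := hcof_pos i h1 hd
      have hsq := pv_sqrt_sq_le n hn0
      rcases lt_or_gt_of_ne hne with hlt | hgt
      · nlinarith
      · nlinarith
    -- the per-divisor tail of the flatMap, on members of smalls
    have htail : ∀ i ∈ smalls,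
        (if i ≠ PySem.Int.floordiv n i then [PySem.Int.floordiv n i] else [])
        = (if i * i ≠ n then [PySem.Int.floordiv n i] else []) := by
      intro i hi
      obtain ⟨h1, _, hd⟩ := hmem i hi
      have he := hcof i h1 hd
      by_cases hq : i = PySem.Int.floordiv n i
      · have hii : i * i = n := by rw [← hq] at he; exact he
        rw [if_neg (not_not_intro hq), if_neg (not_not_intro hii)]
      · rw [if_pos hq, if_pos (fun hc => hq (mul_left_cancel₀ (by omega) (hc.trans he.symm)))]
    -- A's loop, rewritten to smalls ++ their cofactors in some order
    have efold : (R.foldl (fun acc i =>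
        if PySem.Int.mod n i = 0 then
          let acc2 := acc ++ [i]
          if i ≠ PySem.Int.floordiv n i then acc2 ++ [PySem.Int.floordiv n i] else acc2
        else acc) [])
        = smalls.flatMap (fun i =>
            i :: (if i ≠ PySem.Int.floordiv n i then [PySem.Int.floordiv n i] else [])) := by
      rw [pv_foldl_divs, List.nil_append, pv_flatMap_guard]
      rfl
    -- Source B's larges list is mids reversed
    have hlr : (smalls.reverse.filter (fun i => i * i != n)).map (fun i => PySem.Int.floordiv n i)
        = mids.reverse := by
      rw [hmid, List.filter_reverse, List.map_reverse]
    -- the cofactor part of the flatMap is mids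
    have h1 : smalls.flatMap
        (fun i => if i ≠ PySem.Int.floordiv n i then [PySem.Int.floordiv n i] else [])
        = mids := by
      rw [List.flatMap_congr htail, pv_flatMap_guard, ← List.map_eq_flatMap, hmid]
      exact congrArg _ (List.filter_congr (fun x _ => by rw [decide_not]; rfl))
    -- permutation
    have hperm : (smalls ++ mids.reverse).Perm (smalls.flatMap (fun i =>
        i :: (if i ≠ PySem.Int.floordiv n i then [PySem.Int.floordiv n i] else []))) := by
      have p1 : (smalls ++ mids.reverse).Perm (smalls ++ mids) :=
        List.Perm.append_left _ (List.reverse_perm _)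
      have p2 : (smalls ++ mids).Perm (smalls.flatMap (fun i =>
          i :: (if i ≠ PySem.Int.floordiv n i then [PySem.Int.floordiv n i] else []))) := by
        rw [← h1]
        exact (pv_flatMap_cons_perm _ _).symm
      exact p1.trans p2
    -- strict sortedness of smalls ++ mids.reverse
    have hsm_sorted : smalls.Pairwise (· < ·) := by
      rw [hsm]
      exact (PySem.List.pairwise_lt_pyRange_one 1 (s + 1)).filter _
    have hlg_sorted : mids.reverse.Pairwise (· < ·) := by
      rw [List.pairwise_reverse, hmid, List.pairwise_map]
      refine List.Pairwise.imp_of_mem ?_ (hsm_sorted.filter _)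
      intro a b ha hb hab
      rw [List.mem_filter] at ha hb
      obtain ⟨h1a, _, hda⟩ := hmem a ha.1
      obtain ⟨h1b, _, hdb⟩ := hmem b hb.1
      have hea := hcof a h1a hda
      have heb := hcof b h1b hdb
      have hpa := hcof_pos a h1a hda
      have hpb := hcof_pos b h1b hdb
      show PySem.Int.floordiv n b < PySem.Int.floordiv n a
      nlinarith
    have hcross : ∀ a ∈ smalls, ∀ b ∈ mids.reverse, a < b := by
      intro a ha b hb
      rw [List.mem_reverse, hmid, List.mem_map] at hb
      obtain ⟨i, hi, hbe⟩ := hb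
      rw [List.mem_filter] at hi
      obtain ⟨h1i, hlei, hdi⟩ := hmem i hi.1
      have hne : i * i ≠ n := by have := hi.2; simpa using this
      have := hbig i h1i hlei hdi hne
      obtain ⟨_, hales, _⟩ := hmem a ha
      omega
    have hsorted : (smalls ++ mids.reverse).Pairwise (· < ·) := by
      rw [List.pairwise_append]
      exact ⟨hsm_sorted, hlg_sorted, hcross⟩
    -- conclude: A's sort of its loop output is exactly Source B's already-sorted list
    have key := PySem.List.sorted_eq_of_perm_of_pairwise_lt _ _ (fun x => x) hperm hsorted
    rw [efold.symm] at key
    rw [key]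
    show smalls ++ mids.reverse
        = smalls ++ (smalls.reverse.filter (fun i => i * i != n)).map (fun i => PySem.Int.floordiv n i)
    rw [hlr]

-- findSome? only depends on the function's values on members
theorem pv_findSome?_congr {α β : Type} (l : List α) (f g : α → Option β)
    (h : ∀ x ∈ l, f x = g x) : l.findSome? f = l.findSome? g := by
  induction l with
  | nil => rfl
  | cons a t ih =>
    simp [List.findSome?_cons, h a (by simp)]
    cases g a with
    | none => exact ih (fun x hx => h x (by simp [hx]))
    | some b => rfl

-- the bucket for residue r is exactly the divisors with that residue, in order
theorem pv_bucket_eq (m r : Int) (ds : List Int) :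
    (ctiiBuckets m ds).getD r [] = ds.filter (fun d => PySem.Int.mod d m == r) := by
  have h : ctiiBuckets m ds
      = (ds.map (fun d => (PySem.Int.mod d m, d))).foldl
          (fun dct p => dct.modify p.1 [] (· ++ [p.2])) PySem.Dict.empty := by
    simp [ctiiBuckets, List.foldl_map]
  rw [h, PySem.Dict.getD_foldl_modify_append]
  simp [List.filter_map, List.map_map, Function.comp_def]

-- Python's (a+b) % m == 0 is the residue match b % m == (-a) % m (m > 0)
theorem pv_residue_iff (a b m : Int) (hm : 0 < m) :
    PySem.Int.mod (a + b) m = 0 ↔ PySem.Int.mod b m = PySem.Int.mod (-a) m := by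
  rw [PySem.Int.mod_eq_emod_of_pos hm, PySem.Int.mod_eq_emod_of_pos hm,
      PySem.Int.mod_eq_emod_of_pos hm,
      Int.emod_eq_emod_iff_emod_sub_eq_zero, sub_neg_eq_add, add_comm b a]

-- A's inner loop equals B's next() over the complementary-residue bucket
theorem pv_inner_eq (k a x sqrt_x m : Int) (hm : 0 < m) (bs : List Int) :
    ctiiInnerA k a x sqrt_x m bs
      = ((bs.filter (fun b => PySem.Int.mod b m == PySem.Int.mod (-a) m)).find? (fun b =>
          decide (sqrt_x ≤ b ∧ a * b ≤ x ∧ PySem.Int.mod x a = 0 ∧ PySem.Int.mod x b = 0 ∧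
            Int.gcd a b = 1))).map (fun b => (k, a, b)) := by
  induction bs with
  | nil => rfl
  | cons b t ih =>
    by_cases hr : PySem.Int.mod b m = PySem.Int.mod (-a) m
    · have hres : PySem.Int.mod (a + b) m = 0 := (pv_residue_iff a b m hm).mpr hr
      rw [List.filter_cons_of_pos (by simp [hr])]
      by_cases hp : sqrt_x ≤ b ∧ a * b ≤ x ∧ PySem.Int.mod x a = 0 ∧ PySem.Int.mod x b = 0 ∧
          Int.gcd a b = 1
      · rw [List.find?_cons_of_pos (by simp [hp])]
        obtain ⟨hp1, hp2, hp3, hp4, hp5⟩ := hp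
        simp only [ctiiInnerA]
        rw [if_neg (not_lt.mpr hp1), if_neg (not_lt.mpr hp2), if_neg (by tauto), if_neg (by simp [hp5]),
          if_pos hres]
        rfl
      · rw [List.find?_cons_of_neg (by simpa using hp)]
        simp only [ctiiInnerA]
        split_ifs with h1 h2 h3 h4 <;> first
          | exact ih
          | exact absurd ⟨not_lt.mp h1, not_lt.mp h2, by tauto, by tauto, by tauto⟩ hp
    · have hres : ¬ PySem.Int.mod (a + b) m = 0 := fun h => hr ((pv_residue_iff a b m hm).mp h)
      rw [List.filter_cons_of_neg (by simp [hr])]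
      simp only [ctiiInnerA]
      split_ifs with h1 h2 h3 h4 <;> exact ih

theorem pv_body_eq (p k : Int) (hk : 0 ≤ k) : ctiiBodyA p k = ctiiBodyB p k := by
  have hm : (0 : Int) < 4 * k + 3 := by omega
  simp only [ctiiBodyA, ctiiBodyB]
  split_ifs with h
  · rfl
  · rw [← pv_divisors_eq]
    refine pv_findSome?_congr _ _ _ (fun a _ => ?_)
    rw [pv_bucket_eq, pv_inner_eq _ _ _ _ _ hm]

-- ===== VERDICT (by name: the statement is the Claim_ definition above) =====
theorem check_type_ii_original_spec : Claim_equal_check_type_ii_original := by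
  intro p k_max _ _
  unfold Spec_check_type_ii_original check_type_ii_original check_type_ii_original_alt
  exact pv_findSome?_congr _ _ _ (fun kk hkk => pv_body_eq p kk ((PySem.List.mem_pyRange_one.mp hkk).1))
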